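-- pv_equiv track=rewrite | github.com/tatsuya4649/mysqlshard | nodes/add_node.py | _hash_biggest
-- ===== SOURCE A (Python) =====
-- def _hash_biggest(hashs,biggest,threshold):
-- 	results = list()
-- 	for h in hashs:
-- 		if biggest is None:
-- 			if threshold > h:
-- 				results.append(h)
-- 		else:
-- 			if h > biggest and threshold > h:
-- 				results.append(h)
-- 	if len(results) == 0:
-- 		return None
-- 	else:
-- 		return max(results)
-- ===== SOURCE B (Python) =====
-- def _hash_biggest(hashs, biggest, threshold):
--     best = None
--     for h in hashs:
--         if threshold > h and (biggest is None or h > biggest):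
--             if best is None or h > best:
--                 best = h
--     return best
-- ===== Notes on version B (the rewrite author's own statement) =====
-- stated objective: simpler
-- what changed: Replaces the intermediate filtered list plus a separate max() scan with one fused pass keeping a running best (None-initialized), merging the two branch cases into a single condition.
import Mathlib
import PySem

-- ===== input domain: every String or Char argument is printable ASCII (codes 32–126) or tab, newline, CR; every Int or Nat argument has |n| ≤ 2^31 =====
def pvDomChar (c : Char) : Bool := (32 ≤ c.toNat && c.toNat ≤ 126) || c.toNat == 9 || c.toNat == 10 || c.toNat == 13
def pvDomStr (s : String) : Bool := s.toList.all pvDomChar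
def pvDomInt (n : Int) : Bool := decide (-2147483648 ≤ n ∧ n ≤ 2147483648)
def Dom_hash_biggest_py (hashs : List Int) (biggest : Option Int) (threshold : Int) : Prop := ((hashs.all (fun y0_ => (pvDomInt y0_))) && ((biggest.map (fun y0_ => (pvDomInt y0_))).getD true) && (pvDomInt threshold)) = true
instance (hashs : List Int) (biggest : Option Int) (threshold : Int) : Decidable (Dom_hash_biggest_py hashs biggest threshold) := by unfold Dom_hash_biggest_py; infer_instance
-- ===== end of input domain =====

-- B replaces A's filtered list + separate max() scan by one fused pass with a running best (objective: simpler).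

-- ===== PORT A =====
-- the for-loop of A: appends h to results under the branch conditions, in order
def hashBiggestLoopA (biggest : Option Int) (threshold : Int) : List Int → List Int → List Int
  | [], results => results
  | h :: t, results =>
      match biggest with
      | none => hashBiggestLoopA biggest threshold t (if threshold > h then results ++ [h] else results)
      | some b => hashBiggestLoopA biggest threshold t (if h > b ∧ threshold > h then results ++ [h] else results)

def hash_biggest_py (hashs : List Int) (biggest : Option Int) (threshold : Int) : Option Int :=
  let results := hashBiggestLoopA biggest threshold hashs []
  if results.length = 0 then none else PySem.List.max? results (fun y => y)

-- ===== PORT B =====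
-- the for-loop of B: one pass maintaining the running best
def hashBiggestLoopB (biggest : Option Int) (threshold : Int) : List Int → Option Int → Option Int
  | [], best => best
  | h :: t, best =>
      if threshold > h ∧ (biggest = none ∨ ∃ b, biggest = some b ∧ h > b) then
        hashBiggestLoopB biggest threshold t
          (match best with
           | none => some h
           | some m => if h > m then some h else some m)
      else hashBiggestLoopB biggest threshold t best

def hash_biggest_py_alt (hashs : List Int) (biggest : Option Int) (threshold : Int) : Option Int :=
  hashBiggestLoopB biggest threshold hashs none

-- ===== PRECONDITION & SPEC =====
def Spec_hash_biggest_py (hashs : List Int) (biggest : Option Int) (threshold : Int) (out : Option Int) : Prop := out = hash_biggest_py_alt hashs biggest threshold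
instance (hashs : List Int) (biggest : Option Int) (threshold : Int) (out : Option Int) : Decidable (Spec_hash_biggest_py hashs biggest threshold out) := by unfold Spec_hash_biggest_py; infer_instance

-- ===== CLAIM (what is proved, stated in full; the proofs are below) =====
def Claim_equal_hash_biggest_py : Prop := ∀ (hashs : List Int) (biggest : Option Int) (threshold : Int), Dom_hash_biggest_py hashs biggest threshold → Spec_hash_biggest_py hashs biggest threshold (hash_biggest_py hashs biggest threshold)

-- ===== LEMMAS AND PROOFS =====

-- A's finalization of a results list: None if empty, else max
def hashBiggestFin (results : List Int) : Option Int :=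
  if results.length = 0 then none else PySem.List.max? results (fun y => y)

theorem hashBiggestFin_append (acc : List Int) (h : Int) :
    hashBiggestFin (acc ++ [h]) =
      (match hashBiggestFin acc with
       | none => some h
       | some m => if h > m then some h else some m) := by
  cases acc with
  | nil => simp [hashBiggestFin, PySem.List.max?_id_cons]
  | cons a t =>
    simp only [hashBiggestFin, List.cons_append, List.length_cons, PySem.List.max?_id_cons]
    rw [if_neg (by simp), if_neg (by simp), List.foldl_append]
    have : List.foldl max (List.foldl max a t) [h]
        = if h > List.foldl max a t then h else List.foldl max a t := by
      simp only [List.foldl, max_def]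
      split_ifs <;> omega
    rw [this]
    split_ifs with hlt <;> simp [hlt]

-- the key invariant: finalizing A's loop result equals B's loop run from the finalized accumulator
theorem loop_invariant (biggest : Option Int) (threshold : Int) (l : List Int) :
    ∀ acc : List Int,
      hashBiggestFin (hashBiggestLoopA biggest threshold l acc) =
        hashBiggestLoopB biggest threshold l (hashBiggestFin acc) := by
  induction l with
  | nil => intro acc; simp [hashBiggestLoopA, hashBiggestLoopB]
  | cons h t ih =>
    intro acc
    cases biggest with
    | none =>
      by_cases hc : threshold > h
      · simp only [hashBiggestLoopA, if_pos hc]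
        rw [ih, hashBiggestFin_append]
        simp only [hashBiggestLoopB]
        rw [if_pos ⟨hc, by simp⟩]
      · simp only [hashBiggestLoopA, if_neg hc]
        rw [ih]
        simp only [hashBiggestLoopB]
        rw [if_neg (by rintro ⟨ht, -⟩; exact hc ht)]
    | some b =>
      by_cases hc : h > b ∧ threshold > h
      · simp only [hashBiggestLoopA, if_pos hc]
        rw [ih, hashBiggestFin_append]
        simp only [hashBiggestLoopB]
        rw [if_pos ⟨hc.2, Or.inr ⟨b, rfl, hc.1⟩⟩]
      · simp only [hashBiggestLoopA, if_neg hc]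
        rw [ih]
        simp only [hashBiggestLoopB]
        rw [if_neg ?_]
        rintro ⟨ht, hor⟩
        rcases hor with h1 | ⟨b', hb', hgt⟩
        · simp at h1
        · injection hb' with e; subst e; exact hc ⟨hgt, ht⟩

-- ===== VERDICT (by name: the statement is the Claim_ definition above) =====
theorem hash_biggest_py_spec : Claim_equal_hash_biggest_py := by
  intro hashs biggest threshold _
  show _ = _
  have := loop_invariant biggest threshold hashs []
  simpa [hash_biggest_py, hash_biggest_py_alt, hashBiggestFin] using this
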